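-- pv_equiv track=rewrite | github.com/RobinKa/tfga | tfga/blades.py | get_normal_ordered
-- ===== SOURCE A (Python) =====
-- from typing import List, Tuple
--
-- def _normal_swap(x: List[str]) -> List[str]:
--     """Swaps the first unordered blade pair and returns the new list as well
--     as whether a swap was performed."""
--     for i in range(len(x) - 1):
--         a, b = x[i], x[i + 1]
--         if a > b:  # string comparison
--             x[i], x[i+1] = b, a
--             return False, x
--     return True, x
--
-- def get_normal_ordered(blade_name: str) -> Tuple[int, str]:
--     """Returns the normal ordered blade name and its sign.
--     Example: 21 => -1, 12
--
--     Args: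
--         blade_name: Blade name for which to return normal ordered
--         name and sign
--
--     Returns:
--         sign: sign of the blade
--         blade_name: normalized name of the blade
--     """
--     blade_name = list(blade_name)
--     sign = -1
--     done = False
--     while not done:
--         sign *= -1
--         done, blade_name = _normal_swap(blade_name)
--     return sign, "".join(blade_name)
-- ===== SOURCE B (Python) =====
-- def get_normal_ordered(blade_name):
--     """Sort once with the library sort; the sign is the parity of the
--     number of inversions, counted in a single quadratic sweep."""
--     inv = 0
--     rest = list(blade_name)
--     while rest:
--         c = rest[0]
--         rest = rest[1:]
--         for d in rest:
--             if d < c: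
--                 inv += 1
--     sign = 1 if inv % 2 == 0 else -1
--     return sign, "".join(sorted(blade_name))
-- ===== Notes on version B (the rewrite author's own statement) =====
-- stated objective: faster
-- what changed: A repeatedly rescans the list from the start, swapping the first unordered adjacent pair until sorted (one full pass per inversion); B sorts once with the library sort and obtains the sign as the parity of the inversion count, computed in a single quadratic sweep.
import Mathlib
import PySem

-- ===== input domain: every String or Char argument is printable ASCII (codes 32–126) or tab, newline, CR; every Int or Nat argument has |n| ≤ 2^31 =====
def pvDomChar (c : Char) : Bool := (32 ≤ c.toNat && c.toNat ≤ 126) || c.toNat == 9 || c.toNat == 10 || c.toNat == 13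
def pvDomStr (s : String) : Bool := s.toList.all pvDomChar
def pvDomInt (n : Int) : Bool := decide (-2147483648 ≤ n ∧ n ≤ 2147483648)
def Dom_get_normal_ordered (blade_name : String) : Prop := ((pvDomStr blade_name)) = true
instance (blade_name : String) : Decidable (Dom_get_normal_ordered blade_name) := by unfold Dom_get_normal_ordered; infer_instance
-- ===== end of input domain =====

-- B sorts once with the library sort and reads the sign off the inversion parity,
-- instead of A's repeated first-unordered-pair swap passes (objective: faster).


-- ===== PORT A =====
-- port of _normal_swap: scan adjacent pairs, swap the first descending one
def normalSwap : List Char → Bool × List Char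
  | [] => (true, [])
  | [a] => (true, [a])
  | a :: b :: rest =>
    if a > b then (false, b :: a :: rest)
    else
      let r := normalSwap (b :: rest)
      (r.1, a :: r.2)

-- number of inversions: termination measure for A's while-loop
def invN : List Char → Nat
  | [] => 0
  | a :: t => t.countP (fun d => d < a) + invN t

-- each performed swap removes exactly one inversion (cited by bubbleLoop's decreasing_by)
theorem normalSwap_false (x : List Char) (h : (normalSwap x).1 = false) :
    (normalSwap x).2.Perm x ∧ invN (normalSwap x).2 + 1 = invN x := by
  induction x with
  | nil => simp [normalSwap] at h
  | cons a t ih =>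
    match t, ih with
    | [], _ => simp [normalSwap] at h
    | b :: rest, ih =>
      by_cases hab : a > b
      · have hred : normalSwap (a :: b :: rest) = (false, b :: a :: rest) := by
          simp [normalSwap, hab]
        rw [hred]
        refine ⟨List.Perm.swap a b rest, ?_⟩
        show invN (b :: a :: rest) + 1 = invN (a :: b :: rest)
        have e1 : invN (b :: a :: rest)
            = rest.countP (fun d => decide (d < b)) + (rest.countP (fun d => decide (d < a)) + invN rest) := by
          simp [invN, not_lt_of_gt hab]
        have e2 : invN (a :: b :: rest)
            = (rest.countP (fun d => decide (d < a)) + 1) + (rest.countP (fun d => decide (d < b)) + invN rest) := by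
          simp [invN, hab]
        omega
      · have hred : normalSwap (a :: b :: rest)
            = ((normalSwap (b :: rest)).1, a :: (normalSwap (b :: rest)).2) := by
          simp [normalSwap, hab]
        have h' : (normalSwap (b :: rest)).1 = false := by rw [hred] at h; exact h
        have hpi := ih h'
        rw [hred]
        refine ⟨hpi.1.cons a, ?_⟩
        show invN (a :: (normalSwap (b :: rest)).2) + 1 = invN (a :: b :: rest)
        have hc : (normalSwap (b :: rest)).2.countP (fun d => decide (d < a))
            = (b :: rest).countP (fun d => decide (d < a)) := hpi.1.countP_eq _
        have h2 := hpi.2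
        simp only [invN, hc] at h2 ⊢
        omega

theorem normalSwap_false_lt (x : List Char) (h : (normalSwap x).1 = false) :
    invN (normalSwap x).2 < invN x := by
  have := (normalSwap_false x h).2; omega

-- port of the while-loop in get_normal_ordered
def bubbleLoop (sign : Int) (x : List Char) : Int × List Char :=
  let r := normalSwap x
  if h : r.1 = true then (-sign, r.2)
  else bubbleLoop (-sign) r.2
termination_by invN x
decreasing_by exact normalSwap_false_lt x (by simpa using h)

def get_normal_ordered (blade_name : String) : Int × String :=
  let r := bubbleLoop (-1) blade_name.toList
  (r.1, String.ofList r.2)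

-- ===== PORT B =====
-- inversion count: one pass over the suffixes, inner counting loop
def invLoop : Int → List Char → Int
  | inv, [] => inv
  | inv, c :: rest =>
    invLoop (rest.foldl (fun acc d => if d < c then acc + 1 else acc) inv) rest

def get_normal_ordered_alt (blade_name : String) : Int × String :=
  let inv := invLoop 0 blade_name.toList
  let sign : Int := if PySem.Int.mod inv 2 = 0 then 1 else -1
  (sign, String.ofList (PySem.List.sorted blade_name.toList (fun x => x) false))

-- ===== PRECONDITION & SPEC =====
def Spec_get_normal_ordered (blade_name : String) (out : Int × String) : Prop := out = get_normal_ordered_alt blade_name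
instance (blade_name : String) (out : Int × String) : Decidable (Spec_get_normal_ordered blade_name out) := by unfold Spec_get_normal_ordered; infer_instance

-- ===== CLAIM (what is proved, stated in full; the proofs are below) =====
def Claim_equal_get_normal_ordered : Prop := ∀ (blade_name : String), Dom_get_normal_ordered blade_name → Spec_get_normal_ordered blade_name (get_normal_ordered blade_name)

-- ===== LEMMAS AND PROOFS =====

-- a list the scan accepts is adjacently ordered, hence sorted and inversion-free
theorem normalSwap_true (x : List Char) (h : (normalSwap x).1 = true) :
    (normalSwap x).2 = x ∧ x.Pairwise (· ≤ ·) := by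
  induction x with
  | nil => simp [normalSwap]
  | cons a t ih =>
    match t, ih with
    | [], _ => simp [normalSwap]
    | b :: rest, ih =>
      by_cases hab : a > b
      · simp [normalSwap, hab] at h
      · have hred : normalSwap (a :: b :: rest)
            = ((normalSwap (b :: rest)).1, a :: (normalSwap (b :: rest)).2) := by
          simp [normalSwap, hab]
        have h' : (normalSwap (b :: rest)).1 = true := by rw [hred] at h; exact h
        have ⟨he, hp⟩ := ih h'
        refine ⟨by rw [hred, he], ?_⟩
        have hab' : a ≤ b := le_of_not_gt hab
        refine List.pairwise_cons.2 ⟨fun d hd => ?_, hp⟩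
        rcases List.mem_cons.1 hd with rfl | hd'
        · exact hab'
        · exact le_trans hab' (List.rel_of_pairwise_cons hp hd')

theorem invN_eq_zero_of_pairwise (x : List Char) (hpw : x.Pairwise (· ≤ ·)) : invN x = 0 := by
  induction x with
  | nil => rfl
  | cons a t ih =>
    have h1 := List.pairwise_cons.1 hpw
    have hc : t.countP (fun d => decide (d < a)) = 0 := by
      rw [List.countP_eq_zero]
      intro d hd
      simp [not_lt_of_ge (h1.1 d hd)]
    simp [invN, hc, ih h1.2]

-- characterisation of A's loop: sorted output, sign = inversion parity (times -start)
theorem bubbleLoop_eq (x : List Char) : ∀ sign : Int,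
    bubbleLoop sign x =
      ((if invN x % 2 = 0 then -sign else sign),
       PySem.List.sorted x (fun y => y) false) := by
  induction x using (measure invN).wf.induction with
  | _ x ih =>
    intro sign
    rw [bubbleLoop]
    by_cases h : (normalSwap x).1 = true
    · have ⟨he, hp⟩ := normalSwap_true x h
      simp [h, he, invN_eq_zero_of_pairwise x hp,
        PySem.List.sorted_eq_self_of_pairwise x (fun y => y) hp]
    · have ⟨hperm, hinv⟩ := normalSwap_false x (by simpa using h)
      have hlt : invN (normalSwap x).2 < invN x := by omega
      simp only [h]
      rw [ih _ hlt (-sign)]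
      have hs : PySem.List.sorted (normalSwap x).2 (fun y => y) false
          = PySem.List.sorted x (fun y => y) false :=
        PySem.List.sorted_eq_sorted_of_perm _ _ _ (fun a b hab => hab) hperm
      rw [hs]
      have : invN x % 2 = 0 ↔ ¬ invN (normalSwap x).2 % 2 = 0 := by omega
      by_cases hp2 : invN (normalSwap x).2 % 2 = 0 <;> simp_all

-- B's inner loops accumulate exactly the inversion count
theorem invLoop_eq (x : List Char) : ∀ inv : Int, invLoop inv x = inv + (invN x : Int) := by
  induction x with
  | nil => intro inv; simp [invLoop, invN]
  | cons c rest ih =>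
    intro inv
    rw [invLoop, PySem.List.foldl_ite_add_one, ih]
    simp [invN]
    ring

-- ===== VERDICT (by name: the statement is the Claim_ definition above) =====
theorem get_normal_ordered_spec : Claim_equal_get_normal_ordered := by
  intro s _
  unfold Spec_get_normal_ordered get_normal_ordered get_normal_ordered_alt
  rw [bubbleLoop_eq, invLoop_eq]
  dsimp only
  have hmod : PySem.Int.mod (0 + (invN s.toList : Int)) 2 = ((invN s.toList % 2 : Nat) : Int) := by
    rw [PySem.Int.mod_eq_emod_of_pos (by norm_num : (0:Int) < 2)]
    omega
  rw [hmod]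
  by_cases h : invN s.toList % 2 = 0
  · simp [h]
  · simp [h]
    omega
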